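-- pv_equiv track=rewrite | github.com/Windowmincastle/Solving-Algorithm-Problems | programmers/greedy_3.py | solution
-- ===== SOURCE A (Python) =====
-- def solution(number, k):
--     # 1924 -> 리스트로 바꿔서
--     lst = list(number)
--     lst.sort()#오름차순 SORT
--     while k != 0:
--         lst.pop(0)
--         k -= 1
--
--     lst.sort(reverse=True)
--     answer = ''.join(lst)
--
--     return answer
-- ===== SOURCE B (Python) =====
-- def solution(number, k):
--     # Counting sort over the 128 ASCII buckets: drop the k smallest
--     # characters greedily from the low buckets, then emit descending.
--     counts = [number.count(chr(code)) for code in range(128)]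
--     rem = k
--     kept = []
--     for c in counts:
--         d = min(rem, c)
--         rem -= d
--         kept.append(c - d)
--     out = []
--     for code in range(127, -1, -1):
--         out.append(chr(code) * kept[code])
--     return ''.join(out)
-- ===== Notes on version B (the rewrite author's own statement) =====
-- stated objective: faster
-- what changed: Replaces A's two comparison sorts plus a pop(0)-k-times loop by a counting sort: build a 128-bucket ASCII histogram, greedily drop k from the lowest buckets, and emit the remaining characters in descending code order.
import Mathlib
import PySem

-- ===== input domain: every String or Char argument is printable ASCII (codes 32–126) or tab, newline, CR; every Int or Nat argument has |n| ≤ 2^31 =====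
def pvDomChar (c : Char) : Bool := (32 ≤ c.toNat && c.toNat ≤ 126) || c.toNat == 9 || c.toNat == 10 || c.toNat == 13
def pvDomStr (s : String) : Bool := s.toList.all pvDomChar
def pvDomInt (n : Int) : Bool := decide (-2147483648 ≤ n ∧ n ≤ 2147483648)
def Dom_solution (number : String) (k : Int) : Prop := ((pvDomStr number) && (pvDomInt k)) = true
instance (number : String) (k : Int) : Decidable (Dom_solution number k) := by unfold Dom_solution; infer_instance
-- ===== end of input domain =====

-- B replaces A's two library sorts and its pop(0) loop by a counting sort over the
-- 128 ASCII buckets (drop k greedily from the low buckets, emit descending).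

-- ===== PORT A =====
-- `while k != 0: lst.pop(0); k -= 1`: the loop runs k times (for k < 0 Python diverges;
-- excluded by Pre_solution).  `pop? lst 0 = none` is Python's IndexError on an empty
-- list (also excluded by Pre_solution); the `[]` in that branch is never reached.
def popFrontLoop : Nat → List Char → List Char
  | 0, lst => lst
  | n + 1, lst =>
    match PySem.List.pop? lst 0 with
    | some (_, rest) => popFrontLoop n rest
    | none => []

def solution (number : String) (k : Int) : String :=
  let lst := number.toList
  let lst := PySem.List.sorted lst (fun c => c) false
  let lst := popFrontLoop k.toNat lst
  let lst := PySem.List.sorted lst (fun c => c) true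
  -- ''.join(lst): every element of Python's lst is a single-character string
  PySem.Str.join "" (lst.map (fun c => String.ofList [c]))

-- ===== PORT B =====
def solution_alt (number : String) (k : Int) : String :=
  let counts : List Int :=
    (PySem.List.pyRange 0 128 1).map
      (fun code => (PySem.Str.count number (String.ofList [Char.ofNat code.toNat]) : Int))
  let kept :=
    (counts.foldl
      (fun (p : Int × List Int) c =>
        let d := min p.1 c
        (p.1 - d, p.2 ++ [c - d]))
      (k, ([] : List Int))).2
  -- chr(code) * kept[code] is a replicated single character
  let out : List (List Char) :=
    (PySem.List.pyRange 127 (-1) (-1)).foldl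
      (fun acc code =>
        acc ++ [List.replicate (PySem.List.pyGetD kept code 0).toNat (Char.ofNat code.toNat)])
      []
  PySem.Str.join "" (out.map (fun cs => String.ofList cs))

-- ===== PRECONDITION & SPEC =====
-- A diverges for k < 0 and raises IndexError for k > len(number); Pre_ keeps exactly
-- the inputs on which A returns.
def Pre_solution (number : String) (k : Int) : Prop :=
  0 ≤ k ∧ k ≤ (number.toList.length : Int)
instance (number : String) (k : Int) : Decidable (Pre_solution number k) := by
  unfold Pre_solution; infer_instance

def pvWitness_solution : String × Int := ("1924", 2)


def Spec_solution (number : String) (k : Int) (out : String) : Prop := out = solution_alt number k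
instance (number : String) (k : Int) (out : String) : Decidable (Spec_solution number k out) := by
  unfold Spec_solution; infer_instance

-- ===== CLAIM (what is proved, stated in full; the proofs are below) =====
def Claim_equal_solution : Prop := ∀ (number : String) (k : Int),
  Dom_solution number k → Pre_solution number k → Spec_solution number k (solution number k)

-- ===== LEMMAS AND PROOFS =====

theorem char_le_iff (a b : Char) : a ≤ b ↔ a.toNat ≤ b.toNat := by
  rw [Char.le_def]; exact UInt32.le_iff_toNat_le

theorem toNat_ofNat_lt (j : Nat) (h : j < 128) : (Char.ofNat j).toNat = j := by
  have hv : j.isValidChar := Or.inl (by omega)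
  simp [Char.toNat_ofNat, hv]

-- Chars.count with a single-character needle is List.count.
theorem count_go_singleton (c : Char) (l : List Char) (fuel acc : Nat)
    (h : l.length ≤ fuel) :
    PySem.Chars.count.go [c] fuel l acc = acc + l.count c := by
  induction fuel generalizing l acc with
  | zero =>
    have : l = [] := List.eq_nil_of_length_eq_zero (Nat.le_zero.mp h)
    subst this; simp [PySem.Chars.count.go]
  | succ n ih =>
    cases l with
    | nil => simp [PySem.Chars.count.go]
    | cons x t =>
      have ht : t.length ≤ n := by simpa using h
      by_cases hx : c = x
      · subst hx
        have hpre : List.isPrefixOf [c] (c :: t) = true := by simp [List.isPrefixOf]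
        simp only [PySem.Chars.count.go, hpre, if_pos, List.length_cons, List.length_nil,
          List.drop_succ_cons, List.drop_zero]
        rw [ih t (acc + 1) ht]
        simp
        omega
      · have hpre : List.isPrefixOf [c] (x :: t) = false := by
          simp [List.isPrefixOf]; exact fun h' => absurd h' hx
        simp only [PySem.Chars.count.go, hpre]
        rw [if_neg (by simp)]
        rw [ih t acc ht]
        simp [Ne.symm hx]

theorem chars_count_singleton (cs : List Char) (c : Char) :
    PySem.Chars.count cs [c] = cs.count c := by
  have : ([c] : List Char).isEmpty = false := rfl
  simp only [PySem.Chars.count, this, Bool.false_eq_true, if_false]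
  simpa using count_go_singleton c cs cs.length 0 le_rfl

theorem popFrontLoop_drop (n : Nat) (l : List Char) (h : n ≤ l.length) :
    popFrontLoop n l = l.drop n := by
  induction n generalizing l with
  | zero => simp [popFrontLoop]
  | succ m ih =>
    cases l with
    | nil => simp at h
    | cons x t =>
      simp only [popFrontLoop, PySem.List.pop?_zero_cons]
      rw [ih t (by simpa using h)]
      simp

-- emission of a list of (multiplicity, character) buckets
def emitOne (p : Nat × Char) : List Char := List.replicate p.1 p.2

def emit (ps : List (Nat × Char)) : List Char := ps.flatMap emitOne

-- greedy removal of r elements from the front buckets (Nat subtraction does the min)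
def keptPairs : Nat → List (Nat × Char) → List (Nat × Char)
  | _, [] => []
  | r, (cnt, x) :: t => (cnt - r, x) :: keptPairs (r - cnt) t

-- the ASCII histogram of cs, one bucket per code below m
def buckets (cs : List Char) (m : Nat) : List (Nat × Char) :=
  (List.range m).map (fun j => (cs.count (Char.ofNat j), Char.ofNat j))

theorem emit_keptPairs (ps : List (Nat × Char)) (r : Nat) :
    emit (keptPairs r ps) = (emit ps).drop r := by
  induction ps generalizing r with
  | nil => simp [emit, keptPairs]
  | cons p t ih =>
    obtain ⟨cnt, x⟩ := p
    simp only [emit, keptPairs, List.flatMap_cons, emitOne] at *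
    rw [List.drop_append, List.drop_replicate, ih, List.length_replicate]

theorem map_snd_keptPairs (ps : List (Nat × Char)) (r : Nat) :
    (keptPairs r ps).map Prod.snd = ps.map Prod.snd := by
  induction ps generalizing r with
  | nil => simp [keptPairs]
  | cons p t ih => obtain ⟨cnt, x⟩ := p; simp [keptPairs, ih]

theorem length_keptPairs (ps : List (Nat × Char)) (r : Nat) :
    (keptPairs r ps).length = ps.length := by
  induction ps generalizing r with
  | nil => simp [keptPairs]
  | cons p t ih => obtain ⟨cnt, x⟩ := p; simp [keptPairs, ih]

-- the Int fold of port B computes keptPairs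
theorem foldl_kept (ps : List (Nat × Char)) (r : Nat) (acc : List Int) :
    ((ps.map (fun p => (p.1 : Int))).foldl
      (fun (p : Int × List Int) c =>
        let d := min p.1 c
        (p.1 - d, p.2 ++ [c - d]))
      ((r : Int), acc)).2 = acc ++ (keptPairs r ps).map (fun p => ((p.1 : Nat) : Int)) := by
  induction ps generalizing r acc with
  | nil => simp [keptPairs]
  | cons p t ih =>
    obtain ⟨cnt, x⟩ := p
    simp only [List.map_cons, List.foldl_cons, keptPairs]
    have h2 : (r : Int) - min (r : Int) (cnt : Int) = ((r - cnt : Nat) : Int) := by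
      rcases le_total r cnt with h | h <;> simp [h]
    have h3 : (cnt : Int) - min (r : Int) (cnt : Int) = ((cnt - r : Nat) : Int) := by
      rcases le_total r cnt with h | h <;> simp [h]
    show ((List.map (fun p => (p.1 : Int)) t).foldl _
      ((r : Int) - min (r : Int) (cnt : Int), acc ++ [(cnt : Int) - min (r : Int) (cnt : Int)])).2 = _
    rw [h2, h3, ih (r - cnt) (acc ++ [((cnt - r : Nat) : Int)])]
    simp

theorem mem_emit_buckets (cs : List Char) (m : Nat) (hm : m ≤ 128) :
    ∀ x ∈ emit (buckets cs m), x.toNat < m := by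
  induction m with
  | zero => simp [emit, buckets]
  | succ m ih =>
    intro x hx
    rw [buckets, List.range_succ, List.map_append] at hx
    rw [emit, List.flatMap_append] at hx
    rcases List.mem_append.mp hx with h | h
    · exact Nat.lt_succ_of_lt (ih (Nat.le_of_succ_le hm) x h)
    · simp only [List.map_cons, List.map_nil, List.flatMap_cons, List.flatMap_nil,
        List.append_nil, emitOne] at h
      have := List.eq_of_mem_replicate h
      subst this
      rw [toNat_ofNat_lt m (by omega)]
      omega

theorem pairwise_emit_buckets (cs : List Char) (m : Nat) (hm : m ≤ 128) :
    (emit (buckets cs m)).Pairwise (· ≤ ·) := by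
  induction m with
  | zero => simp [emit, buckets]
  | succ m ih =>
    rw [buckets, List.range_succ, List.map_append, emit, List.flatMap_append]
    apply List.pairwise_append.mpr
    refine ⟨ih (Nat.le_of_succ_le hm), ?_, ?_⟩
    · simp only [List.map_cons, List.map_nil, List.flatMap_cons, List.flatMap_nil,
        List.append_nil, emitOne]
      exact List.pairwise_replicate.mpr (Or.inr le_rfl)
    · intro x hx y hy
      simp only [List.map_cons, List.map_nil, List.flatMap_cons, List.flatMap_nil,
        List.append_nil, emitOne] at hy
      have hy' := List.eq_of_mem_replicate hy
      subst hy'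
      have hx' := mem_emit_buckets cs m (Nat.le_of_succ_le hm) x hx
      rw [char_le_iff, toNat_ofNat_lt m (by omega)]
      omega

theorem count_emit_buckets (cs : List Char) (m : Nat) (hm : m ≤ 128) (a : Char) :
    (emit (buckets cs m)).count a = if a.toNat < m then cs.count a else 0 := by
  induction m with
  | zero => simp [emit, buckets]
  | succ m ih =>
    rw [buckets, List.range_succ, List.map_append, emit, List.flatMap_append,
      List.count_append]
    have ihm := ih (Nat.le_of_succ_le hm)
    rw [emit, buckets] at ihm
    rw [ihm]
    simp only [List.map_cons, List.map_nil, List.flatMap_cons, List.flatMap_nil,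
      List.append_nil, emitOne, List.count_replicate]
    by_cases ha : a = Char.ofNat m
    · subst ha
      have hta : (Char.ofNat m).toNat = m := toNat_ofNat_lt m (by omega)
      rw [hta, if_neg (Nat.lt_irrefl m), if_pos (by simp), if_pos (Nat.lt_succ_self m)]
      simp
    · have hbeq : (Char.ofNat m == a) = false := by
        rw [beq_eq_false_iff_ne]
        exact fun h => ha h.symm
      rw [hbeq]
      simp only [Bool.false_eq_true, if_false, Nat.add_zero]
      have hne : a.toNat ≠ m := by
        intro he
        apply ha
        rw [← he, Char.ofNat_toNat]
      by_cases hlt : a.toNat < m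
      · rw [if_pos hlt, if_pos (by omega)]
      · rw [if_neg hlt, if_neg (by omega)]

theorem sorted_asc_eq (cs : List Char) (hdom : ∀ c ∈ cs, c.toNat < 128) :
    PySem.List.sorted cs (fun c => c) false = emit (buckets cs 128) := by
  apply PySem.List.sorted_id_eq_of_perm_of_pairwise
  · rw [List.perm_iff_count]
    intro a
    rw [count_emit_buckets cs 128 le_rfl a]
    by_cases h : a.toNat < 128
    · rw [if_pos h]
    · rw [if_neg h]
      symm
      rw [List.count_eq_zero]
      intro hmem
      exact h (hdom a hmem)
  · exact pairwise_emit_buckets cs 128 le_rfl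

theorem sorted_desc_of_pairwise (l : List Char) (h : l.Pairwise (· ≤ ·)) :
    PySem.List.sorted l (fun c => c) true = l.reverse := by
  have hp : (PySem.List.sorted l (fun c => c) true).Pairwise (fun a b => b ≤ a) :=
    PySem.List.sorted_pairwise_rev l (fun c => c)
  have hperm : (PySem.List.sorted l (fun c => c) true).Perm l :=
    PySem.List.sorted_perm l (fun c => c) true
  have key : (PySem.List.sorted l (fun c => c) true).reverse = l := by
    apply PySem.List.eq_of_perm_of_pairwise_le_of_injective (fun c => c)
      (fun _ _ hab => hab)
    · exact (List.reverse_perm _).trans hperm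
    · rw [List.pairwise_reverse]; exact hp
    · exact h
  conv_rhs => rw [← key]
  rw [List.reverse_reverse]

theorem join_nil_flatten (ps : List (List Char)) :
    PySem.Chars.join [] ps = ps.flatten := by
  induction ps with
  | nil => simp [PySem.Chars.join, List.intercalate]
  | cons a t ih =>
    cases t with
    | nil => simp [PySem.Chars.join, List.intercalate]
    | cons b t2 =>
      rw [PySem.Chars.join_cons_cons, ih]
      simp

theorem flatMap_congr_mem {α β : Type} (l : List α) (f g : α → List β)
    (h : ∀ x ∈ l, f x = g x) : l.flatMap f = l.flatMap g := by
  induction l with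
  | nil => rfl
  | cons a t ih =>
    simp only [List.flatMap_cons]
    rw [h a (by simp), ih (fun x hx => h x (by simp [hx]))]

theorem flatten_map_eq_flatMap {α β : Type} (l : List α) (f : α → List β) :
    (l.map f).flatten = l.flatMap f := by
  induction l with
  | nil => rfl
  | cons a t ih => simp [List.flatMap_cons, ih]

theorem flatMap_rev {α β : Type} (l : List α) (g : α → List β) :
    (l.reverse).flatMap g = (l.flatMap (fun x => (g x).reverse)).reverse := by
  rw [List.reverse_flatMap]
  exact (flatMap_congr_mem _ _ _ (fun x _ => by simp)).symm

-- the flatMap over indices of a bucket list with snd j = chr(j) is its emission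
theorem emit_of_getD (q : List (Nat × Char)) (m : Nat) (hlen : q.length = m)
    (hsnd : q.map Prod.snd = (List.range m).map Char.ofNat) :
    (List.range m).flatMap
      (fun j => List.replicate (q.getD j (0, Char.ofNat 0)).1 (Char.ofNat j)) = emit q := by
  have hq : q = (List.range m).map (fun j => q.getD j (0, Char.ofNat 0)) := by
    apply List.ext_getElem
    · simp [hlen]
    · intro j h1 h2
      simp only [List.getElem_map, List.getElem_range]
      rw [List.getD_eq_getElem?_getD, List.getElem?_eq_getElem (by omega), Option.getD_some]
  conv_rhs => rw [emit, hq]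
  rw [List.flatMap_map]
  apply flatMap_congr_mem
  intro j hj
  have hj' : j < m := List.mem_range.mp hj
  have h2 : (q.getD j (0, Char.ofNat 0)).2 = Char.ofNat j := by
    rw [List.getD_eq_getElem?_getD, List.getElem?_eq_getElem (by omega), Option.getD_some]
    have := congrArg (fun l => l[j]?) hsnd
    simp only [List.getElem?_map] at this
    rw [List.getElem?_eq_getElem (by omega),
      List.getElem?_eq_getElem (by simpa using hj')] at this
    simp only [List.getElem_range, Option.map_some, Option.some.injEq] at this
    exact this
  rw [emitOne, h2]

-- ===== VERDICT (by name: the statement is the Claim_ definition above) =====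
theorem solution_spec : Claim_equal_solution := by
  unfold Claim_equal_solution
  intro number k hdom hpre
  unfold Spec_solution
  obtain ⟨hk0, hklen⟩ := hpre
  have hdc : ∀ c ∈ number.toList, c.toNat < 128 := by
    have h := hdom
    unfold Dom_solution pvDomStr at h
    rw [Bool.and_eq_true] at h
    have h1 := h.1
    rw [List.all_eq_true] at h1
    intro c hc
    have := h1 c hc
    unfold pvDomChar at this
    simp at this
    omega
  have hkn : k = (k.toNat : Int) := by omega
  set cs := number.toList with hcs
  set n := k.toNat with hn
  have hnlen : n ≤ cs.length := by omega
  have hsortlen : n ≤ (PySem.List.sorted cs (fun c => c) false).length := by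
    rw [PySem.List.length_sorted]; exact hnlen
  have hpair : ((PySem.List.sorted cs (fun c => c) false).drop n).Pairwise (· ≤ ·) :=
    List.Pairwise.sublist (List.drop_sublist n _) (PySem.List.sorted_pairwise cs (fun c => c))
  -- the A side: sort ascending, drop the n smallest, sort descending
  have hA : (solution number k).toList
      = ((PySem.List.sorted cs (fun c => c) false).drop n).reverse := by
    simp only [solution, ← hcs, ← hn]
    rw [popFrontLoop_drop n _ hsortlen]
    rw [sorted_desc_of_pairwise _ hpair]
    rw [PySem.Str.toList_join, List.map_map]
    have hcomp : (String.toList ∘ fun c => String.ofList [c]) = fun c => [c] := by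
      funext c; simp
    rw [hcomp, show ("" : String).toList = [] from rfl]
    exact PySem.Chars.join_nil_singletons _
  -- the B side: counting sort
  have hrange : PySem.List.pyRange 0 128 1 = (List.range 128).map (fun j : Nat => (j : Int)) := by
    rw [PySem.List.pyRange_one]
    norm_num [show Int.toNat 128 = 128 from rfl]
  have hB : (solution_alt number k).toList
      = ((PySem.List.sorted cs (fun c => c) false).drop n).reverse := by
    simp only [solution_alt]
    rw [hrange]
    have hcounts : ((List.range 128).map (fun j : Nat => (j : Int))).map
          (fun code => (PySem.Str.count number (String.ofList [Char.ofNat code.toNat]) : Int))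
        = (buckets cs 128).map (fun p => ((p.1 : Nat) : Int)) := by
      rw [List.map_map, buckets, List.map_map]
      apply List.map_congr_left
      intro j hj
      simp only [Function.comp]
      rw [PySem.Str.count_eq, String.toList_ofList, chars_count_singleton]
      simp [hcs]
    rw [hcounts]
    conv_lhs => rw [hkn]
    rw [foldl_kept (buckets cs 128) n []]
    simp only [List.nil_append]
    set q := keptPairs n (buckets cs 128) with hqdef
    have hqlen : q.length = 128 := by
      rw [hqdef, length_keptPairs, buckets]; simp
    have hqsnd : q.map Prod.snd = (List.range 128).map Char.ofNat := by
      rw [hqdef, map_snd_keptPairs, buckets, List.map_map]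
      rfl
    rw [show PySem.List.pyRange 127 (-1) (-1) = (PySem.List.pyRange 0 128 1).reverse by
      rw [PySem.List.pyRange_neg_one_eq_reverse]; norm_num]
    rw [PySem.List.foldl_append_singleton_eq_map, List.nil_append]
    rw [PySem.Str.toList_join, List.map_map]
    have hcomp : (String.toList ∘ fun cs : List Char => String.ofList cs)
        = fun cs : List Char => cs := by funext cs; simp
    rw [hcomp, List.map_id', show ("" : String).toList = [] from rfl, join_nil_flatten]
    rw [flatten_map_eq_flatMap, flatMap_rev, hrange, List.flatMap_map]
    rw [flatMap_congr_mem (List.range 128) _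
      (fun j => List.replicate ((q.getD j (0, Char.ofNat 0)).1) (Char.ofNat j)) ?_]
    · rw [emit_of_getD q 128 hqlen hqsnd, hqdef, emit_keptPairs, sorted_asc_eq cs hdc]
    · intro j hj
      have hj' : j < 128 := List.mem_range.mp hj
      have hkd : PySem.List.pyGetD (q.map (fun p => ((p.1 : Nat) : Int))) ((j : Nat) : Int) 0
          = ((q.getD j (0, Char.ofNat 0)).1 : Int) := by
        rw [PySem.List.pyGetD_natCast]
        rw [List.getD_eq_getElem?_getD, List.getD_eq_getElem?_getD, List.getElem?_map]
        rw [List.getElem?_eq_getElem (by omega)]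
        simp
      simp only [Int.toNat_natCast, hkd, Int.toNat_natCast, List.reverse_replicate]
  exact String.toList_inj.mp (hA.trans hB.symm)
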